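-- pv_equiv track=rewrite | github.com/odcampbell/TSP-Algorithms | TSP_HPrime.py | find_largest_edges_per_node
-- ===== SOURCE A (Python) =====
-- def find_largest_edges_per_node(lower_triangle_matrix):
--     largest_edges_per_node = []
--
--     for i, row in enumerate(lower_triangle_matrix):
--         # Exclude the diagonal elements and the current node
--         non_zero_values = [value for j, value in enumerate(row[:i]) if value != 0]
--
--         if non_zero_values:
--             max_edge = max(non_zero_values)
--             largest_edges_per_node.append((i, row.index(max_edge), max_edge))
--
--     return largest_edges_per_node
-- ===== SOURCE B (Python) =====
-- def find_largest_edges_per_node(lower_triangle_matrix):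
--     result = []
--     for i, row in enumerate(lower_triangle_matrix):
--         best = None  # (value, index) of the running maximum among non-zero entries of row[:i]
--         for j, v in enumerate(row[:i]):
--             if v != 0 and (best is None or v > best[0]):
--                 best = (v, j)
--         if best is not None:
--             result.append((i, best[1], best[0]))
--     return result
-- ===== Notes on version B (the rewrite author's own statement) =====
-- stated objective: alternative
-- what changed: Replaces A's three traversals per row (list-comprehension filter of row[:i], max() over the filtered values, then row.index() over the whole row) with one combined scan of row[:i] that maintains the running (value, index) maximum of the non-zero entries, updating only on strictly greater values to keep first-occurrence index semantics.
import Mathlib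
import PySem

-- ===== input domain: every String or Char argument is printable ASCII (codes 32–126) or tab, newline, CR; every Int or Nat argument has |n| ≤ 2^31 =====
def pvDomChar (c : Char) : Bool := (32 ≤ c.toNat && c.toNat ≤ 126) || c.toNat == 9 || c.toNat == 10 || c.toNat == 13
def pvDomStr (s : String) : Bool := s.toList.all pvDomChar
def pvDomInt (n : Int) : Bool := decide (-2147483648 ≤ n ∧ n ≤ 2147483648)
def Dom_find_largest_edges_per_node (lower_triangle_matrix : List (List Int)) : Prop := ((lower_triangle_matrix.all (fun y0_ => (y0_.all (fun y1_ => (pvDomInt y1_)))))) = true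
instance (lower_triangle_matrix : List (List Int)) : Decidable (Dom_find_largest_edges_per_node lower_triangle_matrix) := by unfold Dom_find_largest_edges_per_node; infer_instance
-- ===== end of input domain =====

-- B replaces A's three traversals per row (comprehension filter, max(), row.index()) by one
-- combined scan keeping the running (value, index) maximum; objective: alternative single-pass decomposition.

-- ===== PORT A =====
def find_largest_edges_per_node (lower_triangle_matrix : List (List Int)) : List (Int × Int × Int) :=
  (PySem.List.enumerate lower_triangle_matrix 0).foldl (fun acc p =>
    let non_zero_values :=
      ((PySem.List.enumerate (PySem.List.slice p.2 none (some p.1)) 0).filter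
        (fun q => decide (q.2 ≠ 0))).map (fun q => q.2)
    if non_zero_values ≠ [] then
      match PySem.List.max? non_zero_values (fun x => x) with
      | some max_edge => acc ++ [(p.1, (((PySem.List.index? p.2 max_edge).getD 0 : Nat) : Int), max_edge)]
      | none => acc
    else acc) []

-- ===== PORT B =====
-- Source B's inner-loop body: update the running (value, index) best on a strictly greater non-zero value
def pvBestStep (best : Option (Int × Int)) (q : Int × Int) : Option (Int × Int) :=
  match best with
  | none => if q.2 ≠ 0 then some (q.2, q.1) else none
  | some b => if q.2 ≠ 0 ∧ b.1 < q.2 then some (q.2, q.1) else some b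

def find_largest_edges_per_node_alt (lower_triangle_matrix : List (List Int)) : List (Int × Int × Int) :=
  (PySem.List.enumerate lower_triangle_matrix 0).foldl (fun result p =>
    let best := (PySem.List.enumerate (PySem.List.slice p.2 none (some p.1)) 0).foldl pvBestStep none
    match best with
    | none => result
    | some b => result ++ [(p.1, b.2, b.1)]) []

-- ===== PRECONDITION & SPEC =====
def Spec_find_largest_edges_per_node (lower_triangle_matrix : List (List Int)) (out : List (Int × Int × Int)) : Prop := out = find_largest_edges_per_node_alt lower_triangle_matrix
instance (lower_triangle_matrix : List (List Int)) (out : List (Int × Int × Int)) : Decidable (Spec_find_largest_edges_per_node lower_triangle_matrix out) := by unfold Spec_find_largest_edges_per_node; infer_instance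

-- ===== CLAIM (what is proved, stated in full; the proofs are below) =====
def Claim_equal_find_largest_edges_per_node : Prop := ∀ (lower_triangle_matrix : List (List Int)), Dom_find_largest_edges_per_node lower_triangle_matrix → Spec_find_largest_edges_per_node lower_triangle_matrix (find_largest_edges_per_node lower_triangle_matrix)

-- ===== LEMMAS AND PROOFS =====

-- the comprehension [v for j, v in enumerate(l)] with a filter on v is just a filter on l
theorem pv_filter_enumerate_snd (l : List Int) (s : Int) :
    ((PySem.List.enumerate l s).filter (fun q => decide (q.2 ≠ 0))).map (fun q => q.2)
      = l.filter (fun v => decide (v ≠ 0)) := by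
  induction l generalizing s with
  | nil => simp [PySem.List.enumerate_nil]
  | cons x t ih =>
    have ih' := ih (s + 1)
    rw [PySem.List.enumerate_cons]
    by_cases h : x = 0 <;> simpa [h] using ih'

theorem pv_max?_append_singleton (xs : List Int) (v : Int) :
    PySem.List.max? (xs ++ [v]) (fun x => x)
      = match PySem.List.max? xs (fun x => x) with
        | none => some v
        | some m => some (if m < v then v else m) := by
  cases xs with
  | nil =>
    rw [(PySem.List.max?_eq_none_iff ([] : List Int) (fun x => x)).mpr rfl]
    simp [PySem.List.max?_id_cons]
  | cons x t =>
    rw [List.cons_append, PySem.List.max?_id_cons, PySem.List.max?_id_cons]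
    simp only [List.foldl_append, List.foldl_cons, List.foldl_nil]
    have : max (t.foldl max x) v = if t.foldl max x < v then v else t.foldl max x := by
      rcases lt_or_ge (t.foldl max x) v with h | h
      · simp [h, max_eq_right h.le]
      · simp [not_lt.mpr h, max_eq_left h]
    rw [this]

-- characterization of B's inner scan: running max value together with its first index
theorem pv_inner_char (l : List Int) :
    (PySem.List.enumerate l 0).foldl pvBestStep none
      = match PySem.List.max? (l.filter (fun v => decide (v ≠ 0))) (fun x => x) with
        | none => none
        | some mx => some (mx, (((PySem.List.index? l mx).getD 0 : Nat) : Int)) := by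
  induction l using List.reverseRecOn with
  | nil =>
    have h0 : PySem.List.max? ([] : List Int) (fun x => x) = none :=
      (PySem.List.max?_eq_none_iff _ _).mpr rfl
    simp [PySem.List.enumerate_nil, h0]
  | append_singleton l v ih =>
    rw [PySem.List.enumerate_append, List.foldl_append, ih, List.filter_append]
    simp only [PySem.List.enumerate_cons, PySem.List.enumerate_nil, List.foldl_cons,
      List.foldl_nil]
    by_cases hv : v = 0
    · -- a zero entry: both the step and the filter ignore it
      subst hv
      have hf : List.filter (fun v => decide (v ≠ 0)) [(0 : Int)] = [] := by simp
      rw [hf, List.append_nil]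
      cases hmx : PySem.List.max? (l.filter (fun v => decide (v ≠ 0))) (fun x => x) with
      | none => simp [pvBestStep]
      | some m =>
        have hm : m ∈ l := List.mem_of_mem_filter (PySem.List.max?_mem hmx)
        have hidx : List.idxOf? m (l ++ [(0 : Int)]) = List.idxOf? m l := by
          simpa using PySem.List.index?_append_of_mem [(0 : Int)] hm
        simp [pvBestStep, hidx]
    · have hfv : List.filter (fun v => decide (v ≠ 0)) [v] = [v] := by simp [hv]
      rw [hfv, pv_max?_append_singleton]
      cases hmx : PySem.List.max? (l.filter (fun v => decide (v ≠ 0))) (fun x => x) with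
      | none =>
        -- no non-zero value in l, so l is all zeros and v is fresh
        have hl : l.filter (fun v => decide (v ≠ 0)) = [] :=
          (PySem.List.max?_eq_none_iff _ _).mp hmx
        have hvl : v ∉ l := by
          intro hmem
          have hvf : v ∈ l.filter (fun v => decide (v ≠ 0)) := by
            simp [List.mem_filter, hmem, hv]
          rw [hl] at hvf; exact absurd hvf (by simp)
        have hidx : List.idxOf? v (l ++ [v]) = some l.length := by
          simpa using PySem.List.index?_append_singleton_self l v hvl
        simp [pvBestStep, hv, hidx]
      | some m =>
        have hm : m ∈ l := List.mem_of_mem_filter (PySem.List.max?_mem hmx)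
        by_cases hlt : m < v
        · -- v strictly beats the old max, hence v ∉ l
          have hvl : v ∉ l := by
            intro hmem
            have hvf : v ∈ l.filter (fun v => decide (v ≠ 0)) := by
              simp [List.mem_filter, hmem, hv]
            have := PySem.List.max?_isMax hmx v hvf
            simp only [] at this
            omega
          have hidx : List.idxOf? v (l ++ [v]) = some l.length := by
            simpa using PySem.List.index?_append_singleton_self l v hvl
          simp [pvBestStep, hv, hlt, hidx]
        · have hidx : List.idxOf? m (l ++ [v]) = List.idxOf? m l := by
            simpa using PySem.List.index?_append_of_mem [v] hm
          simp [pvBestStep, hv, hlt, hidx]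

-- per-row agreement of the two fold bodies, at a natural row index
theorem pv_row_eq (s : Nat) (row : List Int) (acc : List (Int × Int × Int)) :
    (let non_zero_values :=
      ((PySem.List.enumerate (PySem.List.slice row none (some (s : Int))) 0).filter
        (fun q => decide (q.2 ≠ 0))).map (fun q => q.2)
     if non_zero_values ≠ [] then
      match PySem.List.max? non_zero_values (fun x => x) with
      | some max_edge => acc ++ [((s : Int), (((PySem.List.index? row max_edge).getD 0 : Nat) : Int), max_edge)]
      | none => acc
     else acc)
    = (let best := (PySem.List.enumerate (PySem.List.slice row none (some (s : Int))) 0).foldl pvBestStep none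
       match best with
       | none => acc
       | some b => acc ++ [((s : Int), b.2, b.1)]) := by
  simp only [PySem.List.slice_to_natCast, pv_filter_enumerate_snd, pv_inner_char]
  cases hmx : PySem.List.max? ((row.take s).filter (fun v => decide (v ≠ 0))) (fun x => x) with
  | none =>
    have hf : (row.take s).filter (fun v => decide (v ≠ 0)) = [] :=
      (PySem.List.max?_eq_none_iff _ _).mp hmx
    rw [hf]
    simp
  | some m =>
    have hm : m ∈ row.take s := List.mem_of_mem_filter (PySem.List.max?_mem hmx)
    have hne : (row.take s).filter (fun v => decide (v ≠ 0)) ≠ [] := by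
      intro h
      rw [(PySem.List.max?_eq_none_iff _ _).mpr h] at hmx
      exact absurd hmx (by simp)
    have hrow : List.idxOf? m row = List.idxOf? m (row.take s) := by
      have : PySem.List.index? row m = PySem.List.index? (row.take s) m := by
        conv_lhs => rw [← List.take_append_drop s row]
        exact PySem.List.index?_append_of_mem _ hm
      simpa using this
    simp [hrow]
    have hmem := List.mem_filter.mp (PySem.List.max?_mem hmx)
    exact ⟨m, hmem.1, by simpa using hmem.2⟩

theorem pv_outer (rows : List (List Int)) :
    ∀ (s : Nat) (acc : List (Int × Int × Int)),
      (PySem.List.enumerate rows (s : Int)).foldl (fun acc p =>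
        let non_zero_values :=
          ((PySem.List.enumerate (PySem.List.slice p.2 none (some p.1)) 0).filter
            (fun q => decide (q.2 ≠ 0))).map (fun q => q.2)
        if non_zero_values ≠ [] then
          match PySem.List.max? non_zero_values (fun x => x) with
          | some max_edge => acc ++ [(p.1, (((PySem.List.index? p.2 max_edge).getD 0 : Nat) : Int), max_edge)]
          | none => acc
        else acc) acc
      = (PySem.List.enumerate rows (s : Int)).foldl (fun result p =>
          let best := (PySem.List.enumerate (PySem.List.slice p.2 none (some p.1)) 0).foldl pvBestStep none
          match best with
          | none => result
          | some b => result ++ [(p.1, b.2, b.1)]) acc := by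
  induction rows with
  | nil => intro s acc; simp [PySem.List.enumerate_nil]
  | cons r rs ih =>
    intro s acc
    rw [PySem.List.enumerate_cons, List.foldl_cons, List.foldl_cons]
    have hcast : ((s : Int) + 1) = ((s + 1 : Nat) : Int) := by push_cast; ring
    rw [hcast, ih (s + 1)]
    congr 1
    exact pv_row_eq s r acc

-- ===== VERDICT (by name: the statement is the Claim_ definition above) =====
theorem find_largest_edges_per_node_spec : Claim_equal_find_largest_edges_per_node := by
  intro m _
  unfold Spec_find_largest_edges_per_node find_largest_edges_per_node find_largest_edges_per_node_alt
  have := pv_outer m 0 []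
  simpa using this
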